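-- pv_equiv track=rewrite | github.com/madpin/cellmage | scripts/retro_changelog_with_llm.py | remove_version_section
-- ===== SOURCE A (Python) =====
-- from typing import List, Optional
--
-- def remove_version_section(changelog_lines: List[str], version: str) -> List[str]:
--     """Remove any existing section for the given version from the changelog lines."""
--     header = f"## [{version}]"
--     header_with_link = f"## [{version}](https://github.com/madpin/cellmage/releases/tag/{version})"
--     start_idx = None
--     end_idx = None
--     for i, line in enumerate(changelog_lines):
--         if line.startswith(header) or line.startswith(header_with_link):
--             start_idx = i
--             # Find where the next version section starts or end of file
--             for j in range(i + 1, len(changelog_lines)):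
--                 if changelog_lines[j].startswith("## [") and j != i:
--                     end_idx = j
--                     break
--             if end_idx is None:
--                 end_idx = len(changelog_lines)
--             break
--     if start_idx is not None:
--         return changelog_lines[:start_idx] + changelog_lines[end_idx:]
--     return changelog_lines
-- ===== SOURCE B (Python) =====
-- from typing import List
--
-- def remove_version_section(changelog_lines: List[str], version: str) -> List[str]:
--     """Remove any existing section for the given version from the changelog lines.
--
--     Single pass state machine: drop the first matching header and its body,
--     keep everything else.  (Note: the link variant header starts with the
--     plain header, so checking the plain header covers both.)
--     """
--     header = f"## [{version}]"
--     result = []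
--     removed = False
--     skipping = False
--     for line in changelog_lines:
--         if not removed and not skipping and line.startswith(header):
--             skipping = True
--             continue
--         if skipping:
--             if line.startswith("## ["):
--                 skipping = False
--                 removed = True
--                 result.append(line)
--             continue
--         result.append(line)
--     return result
-- ===== Notes on version B (the rewrite author's own statement) =====
-- stated objective: simpler
-- what changed: Replaces the index-scan (enumerate + inner range loop to find start/end indices, then slice concatenation) by a single-pass state machine with removed/skipping flags that copies lines while dropping the matched section.
import Mathlib
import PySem

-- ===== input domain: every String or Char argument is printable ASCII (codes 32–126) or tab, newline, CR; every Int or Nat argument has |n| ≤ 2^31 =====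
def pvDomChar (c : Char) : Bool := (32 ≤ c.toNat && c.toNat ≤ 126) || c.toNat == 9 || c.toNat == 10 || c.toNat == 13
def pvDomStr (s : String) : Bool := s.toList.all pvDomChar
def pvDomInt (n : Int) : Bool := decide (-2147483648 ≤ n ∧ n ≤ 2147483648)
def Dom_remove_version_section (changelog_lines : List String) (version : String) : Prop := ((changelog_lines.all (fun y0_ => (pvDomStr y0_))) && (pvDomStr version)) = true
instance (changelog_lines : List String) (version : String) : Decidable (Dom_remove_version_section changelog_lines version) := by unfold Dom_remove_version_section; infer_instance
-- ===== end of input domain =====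

-- B replaces A's index-scan (find start/end indices, then slice concatenation) by a
-- single-pass state machine with removed/skipping flags; objective: simpler, same O(n) cost.


-- ===== PORT A =====
-- outer loop 'for i, line in enumerate(...): if line.startswith(header) or ...: start_idx = i; ...; break'
def aFindStart (header hlink : String) : List String → Nat → Option Nat
  | [], _ => none
  | l :: ls, i =>
      if PySem.Str.startswith l header || PySem.Str.startswith l hlink then some i
      else aFindStart header hlink ls (i + 1)

-- inner loop 'for j in range(i+1, len(...)): if changelog_lines[j].startswith("## [") and j != i: end_idx = j; break'
-- (iterating the index range j = i+1 .. len-1 over lines[j] is iterating the suffix lines.drop (i+1))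
def aFindEnd (i : Nat) : List String → Nat → Option Nat
  | [], _ => none
  | l :: ls, j =>
      if PySem.Str.startswith l "## [" && decide (j ≠ i) then some j
      else aFindEnd i ls (j + 1)

def remove_version_section (changelog_lines : List String) (version : String) : List String :=
  let header := "## [" ++ version ++ "]"
  let hlink := "## [" ++ version ++ "](https://github.com/madpin/cellmage/releases/tag/" ++ version ++ ")"
  match aFindStart header hlink changelog_lines 0 with
  | none => changelog_lines
  | some start_idx =>
      let end_idx :=
        (aFindEnd start_idx (changelog_lines.drop (start_idx + 1)) (start_idx + 1)).getD
          changelog_lines.length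
      -- changelog_lines[:start_idx] + changelog_lines[end_idx:] (both indices nonnegative, so take/drop are exact)
      changelog_lines.take start_idx ++ changelog_lines.drop end_idx

-- ===== PORT B =====
def bGo (header : String) : List String → Bool → Bool → List String
  | [], _, _ => []
  | l :: ls, removed, skipping =>
      if !removed && !skipping && PySem.Str.startswith l header then
        bGo header ls removed true
      else if skipping then
        if PySem.Str.startswith l "## [" then l :: bGo header ls true false
        else bGo header ls removed skipping
      else l :: bGo header ls removed skipping

def remove_version_section_alt (changelog_lines : List String) (version : String) : List String :=
  let header := "## [" ++ version ++ "]"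
  bGo header changelog_lines false false

-- ===== PRECONDITION & SPEC =====
def Spec_remove_version_section (changelog_lines : List String) (version : String) (out : List String) : Prop := out = remove_version_section_alt changelog_lines version
instance (changelog_lines : List String) (version : String) (out : List String) : Decidable (Spec_remove_version_section changelog_lines version out) := by unfold Spec_remove_version_section; infer_instance

-- ===== CLAIM (what is proved, stated in full; the proofs are below) =====
def Claim_equal_remove_version_section : Prop := ∀ (changelog_lines : List String) (version : String), Dom_remove_version_section changelog_lines version → Spec_remove_version_section changelog_lines version (remove_version_section changelog_lines version)

-- ===== LEMMAS AND PROOFS =====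

-- first index whose line starts with the header (or the link variant)
def firstMatch (header hlink : String) : List String → Option Nat
  | [] => none
  | l :: ls =>
      if PySem.Str.startswith l header || PySem.Str.startswith l hlink then some 0
      else (firstMatch header hlink ls).map (· + 1)

-- first index whose line starts with "## ["
def firstHdr : List String → Option Nat
  | [] => none
  | l :: ls =>
      if PySem.Str.startswith l "## [" then some 0
      else (firstHdr ls).map (· + 1)

theorem aFindStart_eq (header hlink : String) (ls : List String) (i : Nat) :
    aFindStart header hlink ls i = (firstMatch header hlink ls).map (· + i) := by
  induction ls generalizing i with
  | nil => rfl
  | cons l ls ih =>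
      simp only [aFindStart, firstMatch]
      by_cases h : (PySem.Str.startswith l header || PySem.Str.startswith l hlink) = true
      · rw [if_pos h, if_pos h]; simp
      · rw [if_neg h, if_neg h, ih]
        cases firstMatch header hlink ls with
        | none => rfl
        | some k => simp; omega

theorem aFindEnd_eq (i : Nat) (ls : List String) (j : Nat) (hij : i < j) :
    aFindEnd i ls j = (firstHdr ls).map (· + j) := by
  induction ls generalizing j with
  | nil => rfl
  | cons l ls ih =>
      have hne : decide (j ≠ i) = true := decide_eq_true (by omega)
      simp only [aFindEnd, firstHdr, hne, Bool.and_true]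
      by_cases h : PySem.Str.startswith l "## [" = true
      · rw [if_pos h, if_pos h]; simp
      · rw [if_neg h, if_neg h, ih (j + 1) (by omega)]
        cases firstHdr ls with
        | none => rfl
        | some k => simp; omega

-- characterization of port A via firstMatch / firstHdr
theorem charA (version : String) (ls : List String) :
    remove_version_section ls version =
      match firstMatch ("## [" ++ version ++ "]")
          ("## [" ++ version ++ "](https://github.com/madpin/cellmage/releases/tag/" ++ version ++ ")") ls with
      | none => ls
      | some s =>
          ls.take s ++
            ls.drop (((firstHdr (ls.drop (s + 1))).map (· + (s + 1))).getD ls.length) := by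
  simp only [remove_version_section]
  rw [aFindStart_eq]
  cases firstMatch ("## [" ++ version ++ "]")
      ("## [" ++ version ++ "](https://github.com/madpin/cellmage/releases/tag/" ++ version ++ ")") ls with
  | none => rfl
  | some s =>
      simp only [Option.map_some, Nat.add_zero]
      rw [aFindEnd_eq s (ls.drop (s + 1)) (s + 1) (by omega)]

theorem bGo_removed (header : String) (ls : List String) :
    bGo header ls true false = ls := by
  induction ls with
  | nil => rfl
  | cons l ls ih => simp only [bGo]; split <;> simp_all

theorem bGo_skip (header : String) (ls : List String) :
    bGo header ls false true =
      match firstHdr ls with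
      | some k => ls.drop k
      | none => [] := by
  induction ls with
  | nil => rfl
  | cons l ls ih =>
      simp only [bGo, firstHdr, Bool.not_true, Bool.and_false, Bool.false_and,
        Bool.false_eq_true, if_false, if_true]
      by_cases h : PySem.Str.startswith l "## [" = true
      · rw [if_pos h, if_pos h, bGo_removed]; simp
      · rw [if_neg h, if_neg h, ih]
        cases firstHdr ls with
        | none => rfl
        | some k => simp

-- a line starting with the link-variant header also starts with the plain header
theorem startswith_hlink (version l : String) :
    PySem.Str.startswith l ("## [" ++ version ++ "](https://github.com/madpin/cellmage/releases/tag/" ++ version ++ ")") = true →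
    PySem.Str.startswith l ("## [" ++ version ++ "]") = true := by
  intro h
  rw [PySem.Str.startswith_eq, PySem.Chars.startswith_iff] at h ⊢
  refine List.IsPrefix.trans ?_ h
  simp only [String.toList_append, List.append_assoc]
  refine List.prefix_append_right_inj _ |>.mpr ?_
  refine List.prefix_append_right_inj _ |>.mpr ?_
  simp [List.cons_prefix_cons]

theorem main_eq (version : String) (ls : List String) :
    bGo ("## [" ++ version ++ "]") ls false false = remove_version_section ls version := by
  induction ls with
  | nil => rfl
  | cons l ls ih =>
      rw [charA] at ih ⊢
      have hm : (PySem.Str.startswith l ("## [" ++ version ++ "]") ||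
          PySem.Str.startswith l ("## [" ++ version ++ "](https://github.com/madpin/cellmage/releases/tag/" ++ version ++ ")")) =
          PySem.Str.startswith l ("## [" ++ version ++ "]") := by
        by_cases h : PySem.Str.startswith l ("## [" ++ version ++ "](https://github.com/madpin/cellmage/releases/tag/" ++ version ++ ")") = true
        · rw [h, startswith_hlink version l h]; rfl
        · rw [Bool.eq_false_iff.mpr h, Bool.or_false]
      simp only [firstMatch, hm]
      by_cases hl : PySem.Str.startswith l ("## [" ++ version ++ "]") = true
      · rw [if_pos hl]
        simp only [bGo, hl, Bool.not_false, Bool.and_true, if_true, bGo_skip]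
        simp only [List.drop_succ_cons, List.drop_zero, List.take_zero, List.nil_append,
          List.length_cons]
        cases h : firstHdr ls with
        | none => simp [List.drop_eq_nil_of_le]
        | some k => simp
      · rw [if_neg hl]
        simp only [bGo, hl, Bool.and_false, Bool.false_eq_true, if_false, ih]
        cases hs : firstMatch ("## [" ++ version ++ "]")
            ("## [" ++ version ++ "](https://github.com/madpin/cellmage/releases/tag/" ++ version ++ ")") ls with
        | none => rfl
        | some s =>
            simp only [Option.map_some, List.take_succ_cons, List.drop_succ_cons,
              List.length_cons, List.cons_append]
            cases he : firstHdr (ls.drop (s + 1)) with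
            | none => simp [List.drop_eq_nil_of_le]
            | some k =>
                simp only [Option.map_some, Option.getD_some]
                have h2 : k + (s + 1) + 1 = k + (s + 1 + 1) := by omega
                rw [← h2, List.drop_succ_cons]

-- ===== VERDICT (by name: the statement is the Claim_ definition above) =====
theorem remove_version_section_spec : Claim_equal_remove_version_section := by
  intro changelog_lines version _
  unfold Spec_remove_version_section remove_version_section_alt
  exact (main_eq version changelog_lines).symm
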